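-- pv_equiv track=rewrite | github.com/amazon-science/doc-mt-metrics | COMET/contrapro_comet.py | add_contexts
-- ===== SOURCE A (Python) =====
-- def add_contexts(txt, contxt):
--     new_contxt = []
--     for i, line in enumerate(contxt):
--         if i > 0:
--             if i % 2 == 0:
--                 continue
--             else:
--                 new_contxt.append(" </s> ".join([contxt[i - 1], line]))
--     new_txt = [" </s> ".join([contxt_line, txt_line]) for contxt_line, txt_line in zip(new_contxt, txt)]
--     return new_txt
-- ===== SOURCE B (Python) =====
-- def add_contexts(txt, contxt):
--     it = iter(contxt)
--     return [" </s> ".join([c0, c1, t]) for (c0, c1), t in zip(zip(it, it), txt)]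
-- ===== Notes on version B (the rewrite author's own statement) =====
-- stated objective: simpler
-- what changed: Replaces the enumerate+modulo+continue scan and the separate second zip pass with a single comprehension that pairs consecutive context lines via zip(it, it) on one iterator and joins all three parts at once.
import Mathlib
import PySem

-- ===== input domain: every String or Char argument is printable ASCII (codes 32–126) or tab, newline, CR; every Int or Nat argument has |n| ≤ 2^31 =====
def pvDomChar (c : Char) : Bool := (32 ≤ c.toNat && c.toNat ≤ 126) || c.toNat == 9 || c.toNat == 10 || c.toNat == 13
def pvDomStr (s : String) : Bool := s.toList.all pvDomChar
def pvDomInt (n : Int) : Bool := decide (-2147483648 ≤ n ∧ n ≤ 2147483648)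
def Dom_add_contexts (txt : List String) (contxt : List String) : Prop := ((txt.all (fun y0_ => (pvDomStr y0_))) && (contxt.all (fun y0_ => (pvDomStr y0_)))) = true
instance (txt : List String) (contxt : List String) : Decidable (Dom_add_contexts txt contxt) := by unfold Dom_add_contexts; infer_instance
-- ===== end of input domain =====

-- B replaces A's enumerate+modulo scan plus a second zip pass with one comprehension
-- pairing consecutive context lines via a shared iterator (objective: simpler).


-- ===== PORT A =====
-- contxt[i-1] is always in range when the branch fires (1 ≤ i < len), so pyGetD is exact here.
def add_contexts (txt : List String) (contxt : List String) : List String :=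
  let new_contxt : List String :=
    (PySem.List.enumerate contxt 0).foldl
      (fun acc p =>
        if p.1 > 0 then
          if p.1 % 2 == 0 then acc
          else acc ++ [PySem.Str.join " </s> " [PySem.List.pyGetD contxt (p.1 - 1) "", p.2]]
        else acc) []
  (new_contxt.zip txt).map (fun q => PySem.Str.join " </s> " [q.1, q.2])

-- ===== PORT B =====
-- zip(zip(it, it), txt) over a shared iterator = pair consecutive elements, then zip with txt.
def pairsOf : List String → List (String × String)
  | a :: b :: r => (a, b) :: pairsOf r
  | _ => []

def add_contexts_alt (txt : List String) (contxt : List String) : List String :=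
  ((pairsOf contxt).zip txt).map (fun q => PySem.Str.join " </s> " [q.1.1, q.1.2, q.2])

-- ===== PRECONDITION & SPEC =====
def Spec_add_contexts (txt : List String) (contxt : List String) (out : List String) : Prop := out = add_contexts_alt txt contxt
instance (txt : List String) (contxt : List String) (out : List String) : Decidable (Spec_add_contexts txt contxt out) := by unfold Spec_add_contexts; infer_instance

-- ===== CLAIM (what is proved, stated in full; the proofs are below) =====
def Claim_equal_add_contexts : Prop := ∀ (txt : List String) (contxt : List String), Dom_add_contexts txt contxt → Spec_add_contexts txt contxt (add_contexts txt contxt)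

-- ===== LEMMAS AND PROOFS =====

-- associativity of joining with the same separator, in the three-part shape used here
theorem pv_join3 (sep a b t : String) :
    PySem.Str.join sep [PySem.Str.join sep [a, b], t] = PySem.Str.join sep [a, b, t] := by
  simp [PySem.Str.join, PySem.Chars.join, List.intercalate, List.intersperse, List.append_assoc]

-- A's filtered/mapped enumerate equals the pairwise join of the remaining suffix
theorem pv_aux (c : List String) :
    ∀ (r : List String) (s : ℕ), c.drop s = r → s % 2 = 0 →
      ((PySem.List.enumerate r (s : Int)).filter
          (fun p => decide (p.1 > 0) && !(p.1 % 2 == 0))).map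
        (fun p => PySem.Str.join " </s> " [PySem.List.pyGetD c (p.1 - 1) "", p.2])
      = (pairsOf r).map (fun q => PySem.Str.join " </s> " [q.1, q.2]) := by
  intro r
  induction r using pairsOf.induct with
  | case1 a b r ih =>
    intro s hdrop hpar
    have hs2 : c.drop (s + 2) = r := by
      have h : c.drop (s + 2) = (c.drop s).drop 2 := by rw [List.drop_drop]
      rw [hdrop] at h; simpa using h
    have hget : c.getD s "" = a := by
      have h := List.getElem?_drop (xs := c) (i := s) (j := 0)
      rw [hdrop] at h
      simp at h
      simp [List.getD, ← h]
    have h1 : (((s : Int)) % 2 == 0) = true := by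
      have : (s : Int) % 2 = 0 := by omega
      simp [this]
    have h2 : ((((s : Int)) + 1) % 2 == 0) = false := by
      have : ((s : Int) + 1) % 2 = 1 := by omega
      simp [this]
    have hcast : (s : Int) + 1 + 1 = ((s + 2 : ℕ) : Int) := by push_cast; ring
    have hrec := ih (s + 2) hs2 (by omega)
    have hidx : ((s : Int) + 1 - 1) = ((s : ℕ) : Int) := by ring
    have hpos1 : (decide ((s : Int) + 1 > 0)) = true := by simp
    simp only [List.getD] at hget
    simp only [PySem.List.enumerate_cons, List.filter_cons, h1, h2, Bool.not_true,
      Bool.and_false, Bool.not_false, Bool.and_true, hpos1, if_true, pairsOf]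
    rw [hcast]
    push_cast at hrec ⊢
    simp [hidx, PySem.List.pyGetD_natCast, List.getD, hget, hrec]
  | case2 r hshape =>
    intro s hdrop hpar
    match r, hshape with
    | [], _ => simp [pairsOf]
    | [x], _ =>
      have h1 : (((s : Int)) % 2 == 0) = true := by
        have : (s : Int) % 2 = 0 := by omega
        simp [this]
      simp [PySem.List.enumerate_cons, PySem.List.enumerate_nil, h1, pairsOf]
    | a :: b :: r, h => exact absurd rfl (by intro hh; exact (h a b r hh).elim)

-- the conditional body of A's loop in the canonical append-if shape
theorem pv_body_eq (c : List String) :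
    (fun (acc : List String) (p : Int × String) =>
        if p.1 > 0 then
          if p.1 % 2 == 0 then acc
          else acc ++ [PySem.Str.join " </s> " [PySem.List.pyGetD c (p.1 - 1) "", p.2]]
        else acc)
    = (fun acc p =>
        if (decide (p.1 > 0) && !(p.1 % 2 == 0)) = true then
          acc ++ [PySem.Str.join " </s> " [PySem.List.pyGetD c (p.1 - 1) "", p.2]]
        else acc) := by
  funext acc p
  by_cases h : p.1 > 0 <;> by_cases h2 : (p.1 % 2 == 0) = true <;> simp [h, h2]

-- ===== VERDICT (by name: the statement is the Claim_ definition above) =====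
theorem add_contexts_spec : Claim_equal_add_contexts := by
  intro txt contxt _
  unfold Spec_add_contexts add_contexts add_contexts_alt
  have haux := pv_aux contxt contxt 0 (by simp) (by simp)
  simp only [Nat.cast_zero] at haux
  simp only [pv_body_eq, PySem.List.foldl_append_if, List.nil_append, haux,
    List.zip_map_left, List.map_map]
  apply List.map_congr_left
  intro q _
  exact pv_join3 " </s> " q.1.1 q.1.2 q.2
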